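-- pv_equiv track=rewrite | github.com/GM-Yongco/tutorial_python_basics | tkinter/PA3.py | detect_abc
-- ===== SOURCE A (Python) =====
-- def detect_abc(x:str = "") -> bool:
-- 	count_a:int = 0
-- 	count_b:int = 0
-- 	count_c:int = 0
-- 	x:list = list(x)
-- 	ret_val = False
--
-- 	word_len:int = len(x)
-- 	i = 0
-- 	while i < word_len and x[i] == 'a':
-- 		count_a += 1
-- 		i += 1
-- 	while i < word_len and x[i] == 'b':
-- 		count_b += 1
-- 		i += 1
-- 	while i < word_len and x[i] == 'c':
-- 		count_c += 1
-- 		i += 1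
-- 	if i == word_len and count_a == count_b == count_c:
-- 		ret_val = True
--
-- 	return ret_val
-- ===== SOURCE B (Python) =====
-- def detect_abc(x: str = "") -> bool:
--     n = x.count('a')
--     return x == 'a' * n + 'b' * n + 'c' * n
-- ===== Notes on version B (the rewrite author's own statement) =====
-- stated objective: simpler
-- what changed: Replaces the three sequential index-based while-loops and final length/count checks by counting the first letter once and comparing the input with the reconstructed canonical string a^n b^n c^n.
import Mathlib
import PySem

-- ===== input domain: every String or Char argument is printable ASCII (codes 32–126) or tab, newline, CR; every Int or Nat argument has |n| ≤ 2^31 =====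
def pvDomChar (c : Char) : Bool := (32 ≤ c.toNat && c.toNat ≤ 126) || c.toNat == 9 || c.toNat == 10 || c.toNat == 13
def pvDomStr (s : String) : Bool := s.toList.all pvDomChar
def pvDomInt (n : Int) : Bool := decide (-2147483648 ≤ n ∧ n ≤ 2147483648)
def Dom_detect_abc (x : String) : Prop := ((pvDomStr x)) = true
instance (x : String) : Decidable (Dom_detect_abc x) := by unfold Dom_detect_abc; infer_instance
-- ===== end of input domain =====

-- B replaces A's three sequential while-loops by counting 'a' once and comparing with the
-- reconstructed canonical string a^n b^n c^n (objective: simpler).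

-- ===== PORT A =====
-- one while-loop 'while i < word_len and x[i] == c: cnt += 1; i += 1', scanning the
-- remaining suffix of the list (the suffix is x[i:]; i and cnt are carried exactly as in A)
def pvLoopRun (c : Char) : List Char → Nat → Nat → List Char × Nat × Nat
  | [], i, cnt => ([], i, cnt)
  | y :: ys, i, cnt => if y = c then pvLoopRun c ys (i + 1) (cnt + 1) else (y :: ys, i, cnt)

def detect_abc (x : String) : Bool :=
  let xs := x.toList
  let word_len := xs.length
  let r1 := pvLoopRun 'a' xs 0 0
  let r2 := pvLoopRun 'b' r1.1 r1.2.1 0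
  let r3 := pvLoopRun 'c' r2.1 r2.2.1 0
  if r3.2.1 = word_len ∧ r1.2.2 = r2.2.2 ∧ r2.2.2 = r3.2.2 then true else false

-- ===== PORT B =====
-- x.count('a') with a one-character needle is exactly List.count 'a' on the characters
def detect_abc_alt (x : String) : Bool :=
  let n := x.toList.count 'a'
  x.toList == List.replicate n 'a' ++ List.replicate n 'b' ++ List.replicate n 'c'

-- ===== PRECONDITION & SPEC =====
def Spec_detect_abc (x : String) (out : Bool) : Prop := out = detect_abc_alt x
instance (x : String) (out : Bool) : Decidable (Spec_detect_abc x out) := by unfold Spec_detect_abc; infer_instance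

-- ===== CLAIM (what is proved, stated in full; the proofs are below) =====
def Claim_equal_detect_abc : Prop := ∀ (x : String), Dom_detect_abc x → Spec_detect_abc x (detect_abc x)

-- ===== LEMMAS AND PROOFS =====

theorem pvLoopRun_eq (c : Char) (ys : List Char) (i cnt : Nat) :
    pvLoopRun c ys i cnt =
      (ys.dropWhile (· = c), i + (ys.takeWhile (· = c)).length,
        cnt + (ys.takeWhile (· = c)).length) := by
  induction ys generalizing i cnt with
  | nil => simp [pvLoopRun]
  | cons y ys ih =>
    by_cases h : y = c
    · simp [pvLoopRun, h, ih]
      omega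
    · simp [pvLoopRun, h]

-- A's scan succeeds exactly when the string decomposes as its maximal runs of 'a','b','c'
-- of equal lengths with nothing left over; this list-level spec characterises detect_abc.
def pvSpecList (l : List Char) : Bool :=
  decide ((((l.dropWhile (· = 'a')).dropWhile (· = 'b')).dropWhile (· = 'c')) = [] ∧
    (l.takeWhile (· = 'a')).length = ((l.dropWhile (· = 'a')).takeWhile (· = 'b')).length ∧
    ((l.dropWhile (· = 'a')).takeWhile (· = 'b')).length
      = (((l.dropWhile (· = 'a')).dropWhile (· = 'b')).takeWhile (· = 'c')).length)

theorem detect_abc_eq (x : String) : detect_abc x = pvSpecList x.toList := by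
  simp only [detect_abc, pvSpecList, pvLoopRun_eq, Nat.zero_add]
  generalize x.toList = l
  have e1 : l.takeWhile (· = 'a') ++ l.dropWhile (· = 'a') = l :=
    List.takeWhile_append_dropWhile
  have e2 : (l.dropWhile (· = 'a')).takeWhile (· = 'b')
      ++ (l.dropWhile (· = 'a')).dropWhile (· = 'b') = l.dropWhile (· = 'a') :=
    List.takeWhile_append_dropWhile
  have e3 : ((l.dropWhile (· = 'a')).dropWhile (· = 'b')).takeWhile (· = 'c')
      ++ ((l.dropWhile (· = 'a')).dropWhile (· = 'b')).dropWhile (· = 'c')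
      = (l.dropWhile (· = 'a')).dropWhile (· = 'b') :=
    List.takeWhile_append_dropWhile
  have h1 := congrArg List.length e1
  have h2 := congrArg List.length e2
  have h3 := congrArg List.length e3
  simp only [List.length_append] at h1 h2 h3
  by_cases hs : ((l.dropWhile (· = 'a')).dropWhile (· = 'b')).dropWhile (· = 'c') = []
  · have hsl : (((l.dropWhile (· = 'a')).dropWhile (· = 'b')).dropWhile (· = 'c')).length = 0 := by
      simp [hs]
    have hlen : (l.takeWhile (· = 'a')).length
        + ((l.dropWhile (· = 'a')).takeWhile (· = 'b')).length
        + (((l.dropWhile (· = 'a')).dropWhile (· = 'b')).takeWhile (· = 'c')).length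
        = l.length := by omega
    simp only [hlen, hs]
    by_cases h12 : (l.takeWhile (· = 'a')).length
        = ((l.dropWhile (· = 'a')).takeWhile (· = 'b')).length <;>
      by_cases h23 : ((l.dropWhile (· = 'a')).takeWhile (· = 'b')).length
        = (((l.dropWhile (· = 'a')).dropWhile (· = 'b')).takeWhile (· = 'c')).length <;>
      simp [h12, h23]
  · have hsl : (((l.dropWhile (· = 'a')).dropWhile (· = 'b')).dropWhile (· = 'c')).length ≠ 0 := by
      simpa [List.length_eq_zero_iff] using hs
    have hne : ¬ ((l.takeWhile (· = 'a')).length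
        + ((l.dropWhile (· = 'a')).takeWhile (· = 'b')).length
        + (((l.dropWhile (· = 'a')).dropWhile (· = 'b')).takeWhile (· = 'c')).length
        = l.length) := by omega
    rw [if_neg (fun h => hne h.1)]
    simp [hs]

theorem takeWhile_eq_replicate (a : Char) (l : List Char) :
    l.takeWhile (· = a) = List.replicate (l.takeWhile (· = a)).length a := by
  rw [List.eq_replicate_iff]
  refine ⟨rfl, fun b hb => ?_⟩
  simpa using List.mem_takeWhile_imp hb

theorem dropWhile_replicate_append (a : Char) (n : Nat) (l : List Char) :
    (List.replicate n a ++ l).dropWhile (· = a) = l.dropWhile (· = a) := by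
  induction n with
  | zero => simp
  | succ n ih => simpa [List.replicate_succ] using ih

theorem dropWhile_cons_ne (a b : Char) (h : b ≠ a) (l : List Char) :
    (b :: l).dropWhile (· = a) = b :: l := by simp [h]

-- B true → A true: on the canonical list the three maximal runs are exactly the replicates.
theorem pvSpecList_canonical (n : Nat) :
    pvSpecList (List.replicate n 'a' ++ List.replicate n 'b' ++ List.replicate n 'c') = true := by
  rcases Nat.eq_zero_or_pos n with hn | hn
  · simp [hn, pvSpecList]
  · obtain ⟨m, rfl⟩ : ∃ m, n = m + 1 := ⟨n - 1, by omega⟩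
    have hd1 : ((List.replicate (m+1) 'a' ++ List.replicate (m+1) 'b' ++ List.replicate (m+1) 'c').dropWhile (· = 'a'))
        = List.replicate (m+1) 'b' ++ List.replicate (m+1) 'c' := by
      rw [List.append_assoc, dropWhile_replicate_append]
      rw [List.replicate_succ, List.cons_append, dropWhile_cons_ne _ _ (by decide)]
    have ht1 : ((List.replicate (m+1) 'a' ++ List.replicate (m+1) 'b' ++ List.replicate (m+1) 'c').takeWhile (· = 'a')).length
        = m + 1 := by
      have e := congrArg List.length
        (List.takeWhile_append_dropWhile (p := (· = 'a'))
          (l := List.replicate (m+1) 'a' ++ List.replicate (m+1) 'b' ++ List.replicate (m+1) 'c'))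
      rw [hd1] at e
      simp [List.length_append] at e ⊢
    have hd2 : ((List.replicate (m+1) 'b' ++ List.replicate (m+1) 'c').dropWhile (· = 'b'))
        = List.replicate (m+1) 'c' := by
      rw [dropWhile_replicate_append]
      rw [List.replicate_succ, dropWhile_cons_ne _ _ (by decide)]
    have ht2 : ((List.replicate (m+1) 'b' ++ List.replicate (m+1) 'c').takeWhile (· = 'b')).length = m + 1 := by
      have e := congrArg List.length
        (List.takeWhile_append_dropWhile (p := (· = 'b'))
          (l := List.replicate (m+1) 'b' ++ List.replicate (m+1) 'c'))
      rw [hd2] at e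
      simp [List.length_append] at e ⊢
    simp only [pvSpecList, hd1, ht1, hd2, ht2]
    simp

-- A true → the list is canonical with n = its count of 'a'.
theorem canonical_of_pvSpecList (l : List Char) (h : pvSpecList l = true) :
    l = List.replicate (l.count 'a') 'a' ++ List.replicate (l.count 'a') 'b'
      ++ List.replicate (l.count 'a') 'c' := by
  simp only [pvSpecList, decide_eq_true_eq] at h
  obtain ⟨hs3, h12, h23⟩ := h
  set n := (l.takeWhile (· = 'a')).length with hn
  have e1 : l.takeWhile (· = 'a') ++ l.dropWhile (· = 'a') = l :=
    List.takeWhile_append_dropWhile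
  have e2 : (l.dropWhile (· = 'a')).takeWhile (· = 'b')
      ++ (l.dropWhile (· = 'a')).dropWhile (· = 'b') = l.dropWhile (· = 'a') :=
    List.takeWhile_append_dropWhile
  have e3 : ((l.dropWhile (· = 'a')).dropWhile (· = 'b')).takeWhile (· = 'c')
      ++ ((l.dropWhile (· = 'a')).dropWhile (· = 'b')).dropWhile (· = 'c')
      = (l.dropWhile (· = 'a')).dropWhile (· = 'b') :=
    List.takeWhile_append_dropWhile
  have hx : l = List.replicate n 'a' ++ List.replicate n 'b' ++ List.replicate n 'c' := by
    calc l = l.takeWhile (· = 'a') ++ l.dropWhile (· = 'a') := e1.symm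
      _ = l.takeWhile (· = 'a') ++ ((l.dropWhile (· = 'a')).takeWhile (· = 'b')
            ++ (l.dropWhile (· = 'a')).dropWhile (· = 'b')) := by rw [e2]
      _ = l.takeWhile (· = 'a') ++ ((l.dropWhile (· = 'a')).takeWhile (· = 'b')
            ++ (((l.dropWhile (· = 'a')).dropWhile (· = 'b')).takeWhile (· = 'c')
              ++ ((l.dropWhile (· = 'a')).dropWhile (· = 'b')).dropWhile (· = 'c'))) := by rw [e3]
      _ = List.replicate n 'a' ++ List.replicate n 'b' ++ List.replicate n 'c' := by
            rw [hs3, List.append_nil, ← List.append_assoc]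
            congr 1
            congr 1
            · exact takeWhile_eq_replicate 'a' l
            · rw [takeWhile_eq_replicate 'b' _, ← h12]
            · rw [takeWhile_eq_replicate 'c' _, ← h23, ← h12]
  have hcount : l.count 'a' = n := by
    rw [hx]
    simp [List.count_append, List.count_replicate]
  rw [hcount]; exact hx

-- ===== VERDICT (by name: the statement is the Claim_ definition above) =====
theorem detect_abc_spec : Claim_equal_detect_abc := by
  intro x _
  unfold Spec_detect_abc detect_abc_alt
  by_cases hB : x.toList = List.replicate (x.toList.count 'a') 'a'
      ++ List.replicate (x.toList.count 'a') 'b' ++ List.replicate (x.toList.count 'a') 'c'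
  · rw [detect_abc_eq, show pvSpecList x.toList = true from hB ▸ pvSpecList_canonical _]
    exact (beq_iff_eq.mpr hB).symm
  · rw [beq_eq_false_iff_ne.mpr hB]
    cases hA : detect_abc x with
    | false => rfl
    | true => exact absurd (canonical_of_pvSpecList x.toList ((detect_abc_eq x) ▸ hA)) hB
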